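-- pv_equiv track=rewrite | github.com/ffekirnew/a2sv-competitive-programming | 990-satisfiability-of-equality-equations/990-satisfiability-of-equality-equations.py | equationsPossible
-- ===== SOURCE A (Python) =====
-- from typing import List
--
-- from collections import defaultdict
--
-- class UnionFind:
--     def __init__(self):
--         self.roots = defaultdict(int)
--         self.rank = defaultdict(int)
--         self.size = defaultdict(int)
--
--     def __repr__(self):
--         return f"{self.roots}"
--
--     def add_node(self, x):
--         if x in self.roots:
--             return
--
--         self.roots[x] = x
--         self.rank[x] = 0
--         self.size[x] = 1
--
--     def _find(self, x) -> int:
--         path = []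
--         while x != self.roots[x]:
--             path.append(x)
--             x = self.roots[x]
--
--         # Path compression
--         for node in path:
--             self.roots[node] = x
--
--         return x
--
--     def connected(self, x, y) -> bool:
--         if x in self.roots and y in self.roots:
--             return self._find(x) == self._find(y)
--
--     def union(self, x, y) -> None:
--         self.add_node(x)
--         self.add_node(y)
--
--         x_root = self._find(x)
--         y_root = self._find(y)
--
--         if x_root == y_root:
--             return
--
--         x_rank = self.rank[x_root]
--         y_rank = self.rank[y_root]
--
--         if self.rank[x_root] == self.rank[y_root]:
--             self.rank[x_root] += 1
--
--         if x_rank > y_rank: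
--             self.roots[y_root] = x_root
--             self.size[x_root] += self.size[y_root]
--         else:
--             self.roots[x_root] = y_root
--             self.size[y_root] += self.size[x_root]
--
-- def equationsPossible(equations: List[str]) -> bool:
--     equals = UnionFind()
--
--     for equation in equations:
--         if "==" in equation:
--             var1, var2 = equation.split("==")
--
--             equals.union(var1, var2)
--
--     for equation in equations:
--         if "!=" in equation:
--             var1, var2 = equation.split("!=")
--
--             if var1 == var2 or equals.connected(var1, var2):
--                 return False
--
--     return True
-- ===== SOURCE B (Python) =====
-- from typing import List
--
--
-- def equationsPossible(equations: List[str]) -> bool: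
--     # Flat-leader relabeling: every seen variable maps directly to its class
--     # representative; a merge rewrites one label everywhere.
--     leader = {}
--
--     for equation in equations:
--         if "==" in equation:
--             var1, var2 = equation.split("==")
--             l1 = leader.setdefault(var1, var1)
--             l2 = leader.setdefault(var2, var2)
--             if l1 != l2:
--                 for k in leader:
--                     if leader[k] == l2:
--                         leader[k] = l1
--
--     for equation in equations:
--         if "!=" in equation:
--             var1, var2 = equation.split("!=")
--             if var1 == var2 or leader.get(var1, var1) == leader.get(var2, var2):
--                 return False
--
--     return True
-- ===== Notes on version B (the rewrite author's own statement) =====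
-- stated objective: simpler
-- what changed: Replaced A's UnionFind class (three defaultdicts, union by rank, path compression, stateful find loops) by one flat variable-to-representative dictionary: a '==' merge rewrites one representative label everywhere, and the '!=' pass is a pure lookup comparison.
-- outside the precondition, e.g. on equationsPossible(['a!=a', 'b!=c!=d']): A returns False, B returns False
import Mathlib
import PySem

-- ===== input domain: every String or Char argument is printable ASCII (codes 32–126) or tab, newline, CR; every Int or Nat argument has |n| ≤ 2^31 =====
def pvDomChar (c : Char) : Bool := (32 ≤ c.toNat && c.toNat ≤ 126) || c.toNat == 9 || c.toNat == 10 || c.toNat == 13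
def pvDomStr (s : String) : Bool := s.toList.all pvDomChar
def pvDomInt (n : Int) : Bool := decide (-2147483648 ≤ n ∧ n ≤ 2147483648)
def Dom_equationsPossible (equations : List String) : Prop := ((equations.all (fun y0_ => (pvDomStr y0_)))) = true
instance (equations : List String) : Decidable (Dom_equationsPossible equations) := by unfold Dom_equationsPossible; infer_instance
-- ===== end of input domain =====

-- B replaces A's rank/size/path-compression union-find trees by a single flat
-- variable→representative dictionary relabelled on each merge (objective: simpler).

-- ===== PORT A =====
-- A's UnionFind state: (roots, rank, size); all three defaultdicts, threaded explicitly.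
abbrev UFSt := PySem.Dict String String × PySem.Dict String Int × PySem.Dict String Int

def ufAddNode (st : UFSt) (x : String) : UFSt :=
  if st.1.contains x then st
  else (st.1.insert x x, st.2.1.insert x 0, st.2.2.insert x 1)

-- the 'while x != self.roots[x]' loop of _find, collecting the path; fuel only makes the
-- recursion total (on every reachable state the loop terminates within roots.size steps,
-- proved below).  roots[x] for a present key is roots.getD x x.
def ufFindLoop (fuel : Nat) (roots : PySem.Dict String String) (x : String)
    (path : List String) : List String × String :=
  match fuel with
  | 0 => (path, x)
  | Nat.succ f =>
    if x ≠ roots.getD x x then ufFindLoop f roots (roots.getD x x) (path ++ [x])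
    else (path, x)

-- _find: walk to the root, then path compression, return (new roots, root)
def ufFind (roots : PySem.Dict String String) (x : String) :
    PySem.Dict String String × String :=
  let pr := ufFindLoop (roots.size + 1) roots x []
  (pr.1.foldl (fun d node => d.insert node pr.2) roots, pr.2)

-- connected: Python returns None when a key is missing; None is falsy at the only
-- call site, so the port returns false there.
def ufConnected (roots : PySem.Dict String String) (x y : String) :
    PySem.Dict String String × Bool :=
  if roots.contains x && roots.contains y then
    let fx := ufFind roots x
    let fy := ufFind fx.1 y
    (fy.1, fx.2 == fy.2)
  else (roots, false)

def ufUnion (st : UFSt) (x y : String) : UFSt :=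
  let st1 := ufAddNode (ufAddNode st x) y
  let fx := ufFind st1.1 x
  let fy := ufFind fx.1 y
  let roots := fy.1
  let xr := fx.2
  let yr := fy.2
  if xr = yr then (roots, st1.2.1, st1.2.2)
  else
    let xRank := st1.2.1.getD xr 0
    let yRank := st1.2.1.getD yr 0
    let rank := if st1.2.1.getD xr 0 = st1.2.1.getD yr 0 then st1.2.1.insert xr (xRank + 1)
                else st1.2.1
    if xRank > yRank then
      (roots.insert yr xr, rank, st1.2.2.insert xr (st1.2.2.getD xr 0 + st1.2.2.getD yr 0))
    else
      (roots.insert xr yr, rank, st1.2.2.insert yr (st1.2.2.getD yr 0 + st1.2.2.getD xr 0))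

-- first loop body: union the two sides of every "==" equation
def eqStep (st : UFSt) (eq : String) : UFSt :=
  if PySem.Str.isIn "==" eq then
    match PySem.Str.split? eq "==" with
    | some [v1, v2] => ufUnion st v1 v2
    | _ => st       -- Python raises ValueError here (tuple unpacking); excluded by Pre_
  else st

-- second loop, threading the roots dict (connected path-compresses it)
def neqLoop (roots : PySem.Dict String String) (eqs : List String) : Bool :=
  match eqs with
  | [] => true
  | eq :: rest =>
    if PySem.Str.isIn "!=" eq then
      match PySem.Str.split? eq "!=" with
      | some [v1, v2] =>
        if v1 = v2 then false
        else
          let c := ufConnected roots v1 v2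
          if c.2 then false else neqLoop c.1 rest
      | _ => true   -- Python raises ValueError here; excluded by Pre_
    else neqLoop roots rest

def equationsPossible (equations : List String) : Bool :=
  let st := equations.foldl eqStep (PySem.Dict.empty, PySem.Dict.empty, PySem.Dict.empty)
  neqLoop st.1 equations

-- ===== PORT B =====
-- 'for k in leader: if leader[k] == l2: leader[k] = l1'  (values only change, keys fixed)
def bMerge (d : PySem.Dict String String) (l1 l2 : String) : PySem.Dict String String :=
  d.keys.foldl (fun d' k => if d'.getD k k == l2 then d'.insert k l1 else d') d

def bStep (d : PySem.Dict String String) (eq : String) : PySem.Dict String String :=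
  if PySem.Str.isIn "==" eq then
    match PySem.Str.split? eq "==" with
    | some [v1, v2] =>
      let l1 := d.getD v1 v1           -- leader.setdefault(var1, var1): returned value …
      let d1 := d.setdefault v1 v1     -- … and the insertion
      let l2 := d1.getD v2 v2
      let d2 := d1.setdefault v2 v2
      if l1 ≠ l2 then bMerge d2 l1 l2 else d2
    | _ => d       -- Python raises ValueError here; excluded by Pre_
  else d

def equationsPossible_alt (equations : List String) : Bool :=
  let leader := equations.foldl bStep PySem.Dict.empty
  equations.all (fun eq =>
    if PySem.Str.isIn "!=" eq then
      match PySem.Str.split? eq "!=" with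
      | some [v1, v2] => !(v1 == v2 || leader.getD v1 v1 == leader.getD v2 v2)
      | _ => true    -- Python raises ValueError here; excluded by Pre_
    else true)

-- ===== PRECONDITION & SPEC =====
-- Pre_ excludes lists in which some equation does not split into exactly two pieces
-- around its "=="/"!=" operator: there Python raises ValueError (in both A and B),
-- except when an earlier inequality has already returned False.
def Pre_equationsPossible (equations : List String) : Prop :=
  ∀ eq ∈ equations,
    (PySem.Str.isIn "==" eq = true → ((PySem.Str.split? eq "==").getD []).length = 2) ∧
    (PySem.Str.isIn "!=" eq = true → ((PySem.Str.split? eq "!=").getD []).length = 2)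
instance (equations : List String) : Decidable (Pre_equationsPossible equations) := by
  unfold Pre_equationsPossible; infer_instance

def pvWitness_equationsPossible : List String := ["a==b", "b==c", "a!=d"]

def Spec_equationsPossible (equations : List String) (out : Bool) : Prop :=
  out = equationsPossible_alt equations
instance (equations : List String) (out : Bool) : Decidable (Spec_equationsPossible equations out) := by
  unfold Spec_equationsPossible; infer_instance

-- ===== CLAIM (what is proved, stated in full; the proofs are below) =====
def Claim_equal_equationsPossible : Prop := ∀ (equations : List String),
  Dom_equationsPossible equations → Pre_equationsPossible equations →
  Spec_equationsPossible equations (equationsPossible equations)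

-- ===== LEMMAS AND PROOFS =====

-- abstractions over A's parent dictionary
def stepR (roots : PySem.Dict String String) (x : String) : String := roots.getD x x
def IsRootD (roots : PySem.Dict String String) (r : String) : Prop := stepR roots r = r
def RootsTo (roots : PySem.Dict String String) (x r : String) : Prop :=
  IsRootD roots r ∧ ∃ n, (stepR roots)^[n] x = r
def WFD (roots : PySem.Dict String String) : Prop := ∀ x, ∃ r, RootsTo roots x r
def SameRootD (roots : PySem.Dict String String) (x y : String) : Prop :=
  ∃ r, RootsTo roots x r ∧ RootsTo roots y r
def leaderOf (d : PySem.Dict String String) (x : String) : String := d.getD x x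

-- the full invariant relating A's roots dictionary to B's leader dictionary
def InvAB (roots d : PySem.Dict String String) : Prop :=
  roots.keys.Nodup ∧
  d.keys.Nodup ∧
  WFD roots ∧
  (∀ x, roots.contains x = true → roots.contains (stepR roots x) = true) ∧
  (∀ x, roots.contains x = d.contains x) ∧
  (∀ x, d.contains x = true → d.contains (leaderOf d x) = true) ∧
  (∀ x y, SameRootD roots x y ↔ leaderOf d x = leaderOf d y)

theorem stepR_insert (roots : PySem.Dict String String) (p r y : String) :
    stepR (roots.insert p r) y = if y = p then r else stepR roots y := by
  simp [stepR, PySem.Dict.getD_insert]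

theorem stepR_of_not_contains (roots : PySem.Dict String String) (x : String)
    (h : roots.contains x = false) : stepR roots x = x :=
  PySem.Dict.getD_of_not_contains roots x h

theorem contains_of_step_ne (roots : PySem.Dict String String) (x : String)
    (h : stepR roots x ≠ x) : roots.contains x = true := by
  by_contra hc
  exact h (stepR_of_not_contains roots x (by simpa using hc))

theorem rootsTo_unique (roots : PySem.Dict String String) (x r r' : String)
    (h1 : RootsTo roots x r) (h2 : RootsTo roots x r') : r = r' := by
  obtain ⟨hr1, n, hn⟩ := h1
  obtain ⟨hr2, m, hm⟩ := h2
  rcases Nat.le_total n m with h | h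
  · have h3 : (stepR roots)^[m] x = r := by
      have h4 := Function.iterate_add_apply (stepR roots) (m - n) n x
      rw [Nat.sub_add_cancel h] at h4
      rw [h4, hn, Function.iterate_fixed hr1]
    rw [← hm, h3]
  · have h3 : (stepR roots)^[n] x = r' := by
      have h4 := Function.iterate_add_apply (stepR roots) (n - m) m x
      rw [Nat.sub_add_cancel h] at h4
      rw [h4, hm, Function.iterate_fixed hr2]
    rw [← hn, h3]

theorem rootsTo_contains (roots : PySem.Dict String String)
    (hvals : ∀ x, roots.contains x = true → roots.contains (stepR roots x) = true)
    (x r : String) (hx : roots.contains x = true) (h : RootsTo roots x r) :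
    roots.contains r = true := by
  obtain ⟨hr, n, hn⟩ := h
  subst hn
  clear hr
  induction n generalizing x with
  | zero => simpa using hx
  | succ k ih =>
    rw [Function.iterate_succ_apply]
    exact ih (stepR roots x) (hvals x hx)

-- inserting p ↦ (root of p) preserves every RootsTo fact
theorem preserve_insert (roots : PySem.Dict String String) (p r0 : String)
    (hp : RootsTo roots p r0) :
    ∀ y rt, RootsTo roots y rt → RootsTo (roots.insert p r0) y rt := by
  intro y rt hy
  have hroot : IsRootD (roots.insert p r0) rt := by
    by_cases hrp : rt = p
    · subst hrp
      have : rt = r0 := rootsTo_unique roots rt rt r0 ⟨hy.1, 0, rfl⟩ hp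
      rw [IsRootD, stepR_insert]
      simp [this]
    · rw [IsRootD, stepR_insert]
      rw [if_neg hrp]
      exact hy.1
  obtain ⟨hrt, n, hn⟩ := hy
  refine ⟨hroot, ?_⟩
  induction n generalizing y with
  | zero =>
    exact ⟨0, hn⟩
  | succ k ih =>
    by_cases hyp : y = p
    · subst hyp
      have hr0 : rt = r0 := rootsTo_unique roots y rt r0 ⟨hrt, k + 1, hn⟩ hp
      refine ⟨1, ?_⟩
      rw [Function.iterate_one, stepR_insert]
      simp [hr0]
    · rw [Function.iterate_succ_apply] at hn
      obtain ⟨m, hm⟩ := ih (stepR roots y) hn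
      refine ⟨m + 1, ?_⟩
      rw [Function.iterate_add_apply, Function.iterate_one, stepR_insert]
      simp [hyp, hm]

-- merging: inserting (root r1) ↦ (root r2) maps every old root r1 to r2
theorem merge_insert (roots : PySem.Dict String String) (r1 r2 : String)
    (h1 : IsRootD roots r1) (h2 : IsRootD roots r2) (hne : r1 ≠ r2) :
    ∀ y rt, RootsTo roots y rt →
      RootsTo (roots.insert r1 r2) y (if rt = r1 then r2 else rt) := by
  intro y rt hy
  have hroot : IsRootD (roots.insert r1 r2) (if rt = r1 then r2 else rt) := by
    by_cases hr : rt = r1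
    · simp only [hr, if_pos]
      rw [IsRootD, stepR_insert]
      rw [if_neg (Ne.symm hne)]
      exact h2
    · simp only [if_neg hr]
      rw [IsRootD, stepR_insert]
      rw [if_neg hr]
      exact hy.1
  obtain ⟨hrt, n, hn⟩ := hy
  refine ⟨hroot, ?_⟩
  induction n generalizing y with
  | zero =>
    subst hn
    by_cases hr : y = r1
    · subst hr
      refine ⟨1, ?_⟩
      rw [Function.iterate_one, stepR_insert]
      simp
    · exact ⟨0, by simp [hr]⟩
  | succ k ih =>
    by_cases hfix : stepR roots y = y
    · have hy' : (stepR roots)^[k + 1] y = y := Function.iterate_fixed hfix (k + 1)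
      have : y = rt := by rw [← hn, hy']
      subst this
      by_cases hr : y = r1
      · subst hr
        refine ⟨1, ?_⟩
        rw [Function.iterate_one, stepR_insert]
        simp
      · exact ⟨0, by simp [hr]⟩
    · have hyne : y ≠ r1 := by
        intro hcon; subst hcon; exact hfix h1
      rw [Function.iterate_succ_apply] at hn
      obtain ⟨m, hm⟩ := ih (stepR roots y) hn
      refine ⟨m + 1, ?_⟩
      rw [Function.iterate_add_apply, Function.iterate_one, stepR_insert]
      simp [hyne, hm]

-- pigeonhole: under a Nodup key list, some root is reached within size steps
theorem exists_reach_le_size (roots : PySem.Dict String String) (x : String)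
    (hwf : ∃ n, IsRootD roots ((stepR roots)^[n] x)) :
    ∃ n ≤ roots.size, IsRootD roots ((stepR roots)^[n] x) := by
  classical
  refine ⟨Nat.find hwf, ?_, Nat.find_spec hwf⟩
  set m := Nat.find hwf with hm
  by_contra hgt
  rw [not_le] at hgt
  -- the first m iterates are pairwise distinct non-root keys
  have hinj : ∀ i ∈ List.range m, ∀ j ∈ List.range m,
      (stepR roots)^[i] x = (stepR roots)^[j] x → i = j := by
    have key : ∀ i j, i < j → j < m → (stepR roots)^[i] x ≠ (stepR roots)^[j] x := by
      intro i j hij hjm heq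
      have hper : ∀ a, i ≤ a → (stepR roots)^[a + (j - i)] x = (stepR roots)^[a] x := by
        intro a ha
        have h1 : a + (j - i) = (a - i) + j := by omega
        have h2 : a = (a - i) + i := by omega
        rw [h1, Function.iterate_add_apply, ← heq, ← Function.iterate_add_apply]
        rw [h2, Nat.sub_add_cancel]
        omega
      have ha := hper (m - (j - i)) (by omega)
      have hmm : m - (j - i) + (j - i) = m := by omega
      rw [hmm] at ha
      have hroot : IsRootD roots ((stepR roots)^[m - (j - i)] x) := by
        rw [← ha]; exact Nat.find_spec hwf
      exact Nat.find_min hwf (by omega) hroot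
    intro i hi j hj heq
    simp only [List.mem_range] at hi hj
    rcases Nat.lt_trichotomy i j with h | h | h
    · exact absurd heq (key i j h hj)
    · exact h
    · exact absurd heq.symm (key j i h hi)
  have hmemb : ∀ i < m, (stepR roots)^[i] x ∈ roots.keys := by
    intro i hi
    have hnr : ¬ IsRootD roots ((stepR roots)^[i] x) := Nat.find_min hwf hi
    have : stepR roots ((stepR roots)^[i] x) ≠ (stepR roots)^[i] x := hnr
    exact (PySem.Dict.contains_iff_mem_keys _ _).1 (contains_of_step_ne _ _ this)
  have hnodupl : ((List.range m).map (fun i => (stepR roots)^[i] x)).Nodup :=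
    (List.nodup_range).map_on hinj
  have hsub : ((List.range m).map (fun i => (stepR roots)^[i] x)).toFinset ⊆
      roots.keys.toFinset := by
    intro y hy
    simp only [List.mem_toFinset, List.mem_map, List.mem_range] at hy
    obtain ⟨i, hi, rfl⟩ := hy
    exact List.mem_toFinset.2 (hmemb i hi)
  have hcard1 : ((List.range m).map (fun i => (stepR roots)^[i] x)).toFinset.card = m := by
    rw [List.toFinset_card_of_nodup hnodupl]
    simp
  have hcard2 : roots.keys.toFinset.card ≤ roots.keys.length := List.toFinset_card_le _
  have hkl : roots.keys.length = roots.size := by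
    simp [PySem.Dict.keys, PySem.Dict.size]
  have := Finset.card_le_card hsub
  omega

-- the find loop returns the root and the path of strictly-moving nodes
theorem ufFindLoop_spec (roots : PySem.Dict String String) (r : String)
    (hr : IsRootD roots r) :
    ∀ n x path fuel, (stepR roots)^[n] x = r → n < fuel →
    ∃ q, ufFindLoop fuel roots x path = (path ++ q, r) ∧
      ∀ p ∈ q, RootsTo roots p r ∧ stepR roots p ≠ p := by
  intro n
  induction n with
  | zero =>
    intro x path fuel hn hf
    simp only [Function.iterate_zero, id] at hn
    subst hn
    cases fuel with
    | zero => omega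
    | succ f =>
      refine ⟨[], ?_, by simp⟩
      have hfix : ¬ x ≠ roots.getD x x := by
        simpa [stepR] using hr.symm
      simp [ufFindLoop, hfix]
  | succ k ih =>
    intro x path fuel hn hf
    cases fuel with
    | zero => omega
    | succ f =>
    by_cases hfix : stepR roots x = x
    · have hx : (stepR roots)^[k + 1] x = x := Function.iterate_fixed hfix (k + 1)
      rw [hx] at hn
      subst hn
      refine ⟨[], ?_, by simp⟩
      have hfix' : ¬ x ≠ roots.getD x x := by simpa [stepR] using hfix.symm
      simp [ufFindLoop, hfix']
    · rw [Function.iterate_succ_apply] at hn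
      obtain ⟨q', hq', hprops⟩ := ih (stepR roots x) (path ++ [x]) f hn (by omega)
      have hne : x ≠ roots.getD x x := fun hcon => hfix (id hcon.symm)
      refine ⟨x :: q', ?_, ?_⟩
      · show ufFindLoop (f + 1) roots x path = (path ++ x :: q', r)
        simp only [ufFindLoop, if_pos hne]
        rw [show roots.getD x x = stepR roots x from rfl]
        rw [hq']
        simp
      · intro p hp
        rcases List.mem_cons.1 hp with rfl | hp'
        · exact ⟨⟨hr, k + 1, by rw [Function.iterate_succ_apply]; exact hn⟩, hfix⟩
        · exact hprops p hp'

-- one path-compression insert keeps the invariant and every RootsTo fact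
theorem compress_insert (roots d : PySem.Dict String String) (p r : String)
    (h : InvAB roots d) (hp : RootsTo roots p r) (hcp : roots.contains p = true) :
    InvAB (roots.insert p r) d ∧
    (∀ y, (roots.insert p r).contains y = roots.contains y) ∧
    (∀ y rt, RootsTo roots y rt → RootsTo (roots.insert p r) y rt) := by
  obtain ⟨hnd, hdnd, hwf, hvals, hkeys, hb2, hagree⟩ := h
  have hpres := preserve_insert roots p r hp
  have hcont : ∀ y, (roots.insert p r).contains y = roots.contains y := by
    intro y
    rw [PySem.Dict.contains_insert]
    by_cases hy : y = p
    · subst hy; simp [hcp]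
    · simp [hy]
  have hsame : ∀ x y, SameRootD (roots.insert p r) x y ↔ SameRootD roots x y := by
    intro x y
    constructor
    · rintro ⟨rt, hx', hy'⟩
      obtain ⟨rx, hrx⟩ := hwf x
      obtain ⟨ry, hry⟩ := hwf y
      have e1 := rootsTo_unique _ x rt rx hx' (hpres x rx hrx)
      have e2 := rootsTo_unique _ y rt ry hy' (hpres y ry hry)
      refine ⟨rx, hrx, ?_⟩
      rw [← e1, e2]
      exact hry
    · rintro ⟨rt, hx', hy'⟩
      exact ⟨rt, hpres x rt hx', hpres y rt hy'⟩
  refine ⟨⟨PySem.Dict.nodup_keys_insert _ _ _ hnd, hdnd, ?_, ?_, ?_, hb2, ?_⟩, hcont, hpres⟩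
  · intro y
    obtain ⟨ry, hry⟩ := hwf y
    exact ⟨ry, hpres y ry hry⟩
  · intro y hy
    rw [hcont] at hy
    rw [hcont, stepR_insert]
    by_cases hyp : y = p
    · simp only [hyp, if_pos]
      exact rootsTo_contains roots hvals p r hcp hp
    · rw [if_neg hyp]
      exact hvals y hy
  · intro y; rw [hcont]; exact hkeys y
  · intro x y
    rw [hsame]
    exact hagree x y

theorem compress_fold (d : PySem.Dict String String) (r : String) :
    ∀ (q : List String) (roots : PySem.Dict String String), InvAB roots d →
    (∀ p ∈ q, RootsTo roots p r ∧ roots.contains p = true) →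
    InvAB (q.foldl (fun d' node => d'.insert node r) roots) d ∧
    (∀ y, (q.foldl (fun d' node => d'.insert node r) roots).contains y = roots.contains y) ∧
    (∀ y rt, RootsTo roots y rt →
      RootsTo (q.foldl (fun d' node => d'.insert node r) roots) y rt) := by
  intro q
  induction q with
  | nil => exact fun roots h _ => ⟨h, fun _ => rfl, fun _ _ hy => hy⟩
  | cons p q' ih =>
    intro roots h hq
    obtain ⟨hp, hcp⟩ := hq p (List.mem_cons_self)
    obtain ⟨h1, hcont1, hpres1⟩ := compress_insert roots d p r h hp hcp
    obtain ⟨h2, hcont2, hpres2⟩ := ih (roots.insert p r) h1 (by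
      intro p' hp'
      obtain ⟨hp'r, hcp'⟩ := hq p' (List.mem_cons_of_mem _ hp')
      exact ⟨hpres1 p' _ hp'r, by rw [hcont1]; exact hcp'⟩)
    refine ⟨by simpa using h2, ?_, ?_⟩
    · intro y
      simpa using (hcont2 y).trans (hcont1 y)
    · intro y rt hy
      simpa using hpres2 y rt (hpres1 y rt hy)

theorem ufFind_spec (roots d : PySem.Dict String String) (x : String)
    (h : InvAB roots d) :
    RootsTo roots x (ufFind roots x).2 ∧
    InvAB (ufFind roots x).1 d ∧
    (∀ y, (ufFind roots x).1.contains y = roots.contains y) ∧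
    (∀ y rt, RootsTo roots y rt → RootsTo (ufFind roots x).1 y rt) := by
  obtain ⟨rt0, hrt0⟩ := h.2.2.1 x
  obtain ⟨hisr0, m0, hm0⟩ := hrt0
  obtain ⟨n, hn, hroot⟩ := exists_reach_le_size roots x ⟨m0, by rw [hm0]; exact hisr0⟩
  set r := (stepR roots)^[n] x with hrdef
  have hxr : RootsTo roots x r := ⟨hroot, n, rfl⟩
  obtain ⟨q, hq, hprops⟩ := ufFindLoop_spec roots r hroot n x [] (roots.size + 1) rfl
    (by omega)
  have hfind : ufFind roots x =
      (q.foldl (fun d' node => d'.insert node r) roots, r) := by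
    rw [ufFind, hq]
    simp
  obtain ⟨h1, hcont, hpres⟩ := compress_fold d r q roots h (by
    intro p hp
    obtain ⟨hpr, hstep⟩ := hprops p hp
    exact ⟨hpr, contains_of_step_ne _ _ hstep⟩)
  rw [hfind]
  exact ⟨hxr, h1, hcont, hpres⟩

-- add_node / setdefault change neither the step function nor the leader function
theorem stepR_addNode (st : UFSt) (x : String) :
    stepR (ufAddNode st x).1 = stepR st.1 := by
  funext y
  rw [ufAddNode]
  by_cases hc : st.1.contains x
  · simp [hc]
  · simp only [hc, Bool.false_eq_true, if_false]
    show stepR (st.1.insert x x) y = stepR st.1 y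
    rw [stepR_insert]
    by_cases hy : y = x
    · subst hy
      rw [if_pos rfl, stepR_of_not_contains st.1 y (by simpa using hc)]
    · rw [if_neg hy]

theorem contains_addNode (st : UFSt) (x : String) :
    ∀ y, (ufAddNode st x).1.contains y = (y == x || st.1.contains y) := by
  intro y
  rw [ufAddNode]
  by_cases hc : st.1.contains x
  · by_cases hy : y = x
    · subst hy; simp [hc]
    · simp [hc, hy]
  · simp only [hc, Bool.false_eq_true, if_false]
    exact PySem.Dict.contains_insert st.1 x y x

theorem leaderOf_setdefault_self (d : PySem.Dict String String) (x : String) :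
    ∀ y, leaderOf (d.setdefault x x) y = leaderOf d y := by
  intro y
  by_cases hc : d.contains x
  · rw [PySem.Dict.setdefault_of_contains d x hc]
  · rw [PySem.Dict.setdefault_of_not_contains d x (by simpa using hc)]
    show (d.insert x x).getD y y = d.getD y y
    rw [PySem.Dict.getD_insert]
    by_cases hy : y = x
    · subst hy
      rw [if_pos rfl, PySem.Dict.getD_of_not_contains d y (by simpa using hc)]
    · rw [if_neg hy]

theorem contains_setdefault_self (d : PySem.Dict String String) (x : String) :
    ∀ y, (d.setdefault x x).contains y = (y == x || d.contains y) :=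
  fun y => PySem.Dict.contains_setdefault d x y x

-- RootsTo / SameRootD only depend on the step function
theorem rootsTo_congr (roots roots' : PySem.Dict String String)
    (hst : stepR roots' = stepR roots) (x r : String) :
    RootsTo roots' x r ↔ RootsTo roots x r := by
  rw [RootsTo, RootsTo, IsRootD, IsRootD, hst]

theorem sameRootD_congr (roots roots' : PySem.Dict String String)
    (hst : stepR roots' = stepR roots) (x y : String) :
    SameRootD roots' x y ↔ SameRootD roots x y := by
  unfold SameRootD
  simp only [rootsTo_congr roots roots' hst]

theorem addNode_invAB (st : UFSt) (d : PySem.Dict String String) (x : String)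
    (h : InvAB st.1 d) : InvAB (ufAddNode st x).1 (d.setdefault x x) := by
  obtain ⟨hnd, hdnd, hwf, hvals, hkeys, hb2, hagree⟩ := h
  have hst := stepR_addNode st x
  have hcA := contains_addNode st x
  have hcB := contains_setdefault_self d x
  have hlead := leaderOf_setdefault_self d x
  refine ⟨?_, ?_, ?_, ?_, ?_, ?_, ?_⟩
  · rw [ufAddNode]
    by_cases hc : st.1.contains x
    · simpa [hc] using hnd
    · simp only [hc, Bool.false_eq_true, if_false]
      exact PySem.Dict.nodup_keys_insert _ _ _ hnd
  · by_cases hc : d.contains x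
    · rw [PySem.Dict.setdefault_of_contains d x hc]
      exact hdnd
    · rw [PySem.Dict.setdefault_of_not_contains d x (by simpa using hc)]
      exact PySem.Dict.nodup_keys_insert _ _ _ hdnd
  · intro y
    obtain ⟨r, hr⟩ := hwf y
    exact ⟨r, (rootsTo_congr _ _ hst y r).2 hr⟩
  · intro y hy
    rw [hcA] at hy
    rw [hcA, hst]
    rcases Bool.or_eq_true_iff.1 hy with hy | hy
    · have hyx : y = x := by simpa using hy
      subst hyx
      by_cases hc : st.1.contains y
      · simp [hvals y hc]
      · rw [stepR_of_not_contains st.1 y (by simpa using hc)]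
        simp
    · simp [hvals y hy]
  · intro y
    rw [hcA, hcB, hkeys y]
  · intro y hy
    rw [hcB] at hy
    rw [hcB, hlead]
    rcases Bool.or_eq_true_iff.1 hy with hy | hy
    · have hyx : y = x := by simpa using hy
      subst hyx
      by_cases hc : d.contains y
      · simp [hb2 y hc]
      · rw [leaderOf, PySem.Dict.getD_of_not_contains d y (by simpa using hc)]
        simp
    · simp [hb2 y hy]
  · intro u v
    rw [sameRootD_congr _ _ hst, hlead, hlead]
    exact hagree u v

-- the relabelling loop of B: every value equal to l2 becomes l1, nothing else moves
theorem bMerge_fold (l1 l2 : String) (hne : l1 ≠ l2) :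
    ∀ (ks : List String) (d : PySem.Dict String String), ks.Nodup →
    (∀ k ∈ ks, d.contains k = true) →
    (∀ y, leaderOf (ks.foldl (fun d' k => if d'.getD k k == l2 then d'.insert k l1 else d') d) y
        = if y ∈ ks ∧ leaderOf d y = l2 then l1 else leaderOf d y) ∧
    (∀ y, (ks.foldl (fun d' k => if d'.getD k k == l2 then d'.insert k l1 else d') d).contains y
        = d.contains y) := by
  intro ks
  induction ks with
  | nil => intro d _ _; constructor <;> intro y <;> simp
  | cons k ks' ih =>
    intro d hnd hks
    have hkc : d.contains k = true := hks k List.mem_cons_self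
    have hknot : k ∉ ks' := (List.nodup_cons.1 hnd).1
    set d1 := if d.getD k k == l2 then d.insert k l1 else d with hd1
    have hcont1 : ∀ y, d1.contains y = d.contains y := by
      intro y
      rw [hd1]
      by_cases hkv : (d.getD k k == l2) = true
      · rw [if_pos hkv, PySem.Dict.contains_insert]
        by_cases hy : y = k
        · subst hy; simp [hkc]
        · simp [hy]
      · rw [if_neg hkv]
    have hlead1 : ∀ y, leaderOf d1 y = if y = k ∧ leaderOf d y = l2 then l1 else leaderOf d y := by
      intro y
      by_cases hkv : leaderOf d k = l2
      · have hd1' : d1 = d.insert k l1 := by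
          rw [hd1, if_pos (show (d.getD k k == l2) = true by simpa [beq_iff_eq, leaderOf] using hkv)]
        rw [hd1']
        show (d.insert k l1).getD y y = _
        rw [PySem.Dict.getD_insert]
        by_cases hy : y = k
        · subst hy
          have hkv' : d.getD y y = l2 := hkv
          simp [leaderOf, hkv']
        · simp [leaderOf, hy]
      · have hd1' : d1 = d := by
          rw [hd1, if_neg (show ¬ (d.getD k k == l2) = true by simpa [beq_iff_eq, leaderOf] using hkv)]
        rw [hd1']
        by_cases hy : y = k
        · subst hy
          have hkv' : ¬ d.getD y y = l2 := hkv
          simp [leaderOf, hkv']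
        · simp [leaderOf, hy]
    obtain ⟨ihl, ihc⟩ := ih d1 (List.nodup_cons.1 hnd).2
      (by intro k' hk'; rw [hcont1]; exact hks k' (List.mem_cons_of_mem _ hk'))
    constructor
    · intro y
      have heq : (k :: ks').foldl (fun d' k => if d'.getD k k == l2 then d'.insert k l1 else d') d
          = ks'.foldl (fun d' k => if d'.getD k k == l2 then d'.insert k l1 else d') d1 := by
        rw [List.foldl_cons]
      rw [heq, ihl y, hlead1 y]
      by_cases hy : y = k
      · subst hy
        have hyks : y ∉ ks' := hknot
        by_cases hv : leaderOf d y = l2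
        · simp [hyks, hv, hne]
        · simp [hyks, hv]
      · have : (y ∈ k :: ks') ↔ (y ∈ ks') := by simp [hy]
        by_cases hm : y ∈ ks' <;> by_cases hv : leaderOf d y = l2 <;>
          simp [hy, hm, hv, this]
    · intro y
      rw [List.foldl_cons, ihc y, hcont1 y]

theorem bMerge_spec (d : PySem.Dict String String) (l1 l2 : String)
    (hnd : d.keys.Nodup) (hl2 : d.contains l2 = true) (hne : l1 ≠ l2) :
    (∀ y, leaderOf (bMerge d l1 l2) y = if leaderOf d y = l2 then l1 else leaderOf d y) ∧
    (∀ y, (bMerge d l1 l2).contains y = d.contains y) := by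
  obtain ⟨hl, hc⟩ := bMerge_fold l1 l2 hne d.keys d hnd
    (by intro k hk; exact (PySem.Dict.contains_iff_mem_keys d k).2 hk)
  refine ⟨?_, hc⟩
  intro y
  rw [show bMerge d l1 l2 = d.keys.foldl (fun d' k => if d'.getD k k == l2 then d'.insert k l1 else d') d from rfl]
  rw [hl y]
  by_cases hm : y ∈ d.keys
  · simp [hm]
  · have hyc : d.contains y = false := by
      by_contra hcon
      exact hm ((PySem.Dict.contains_iff_mem_keys d y).1 (by simpa using hcon))
    have hy : leaderOf d y = y := PySem.Dict.getD_of_not_contains d y hyc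
    have hyl2 : leaderOf d y ≠ l2 := by
      rw [hy]
      intro hcon
      subst hcon
      rw [hl2] at hyc
      exact Bool.noConfusion hyc
    simp [hm, hyl2]

-- collapsing two distinct values with 'if z = r1 then r2 else z'
theorem collapse_iff (r1 r2 : String) (a b : String) :
    ((if a = r1 then r2 else a) = (if b = r1 then r2 else b)) ↔
    (a = b ∨ ((a = r1 ∨ a = r2) ∧ (b = r1 ∨ b = r2))) := by
  by_cases ha : a = r1 <;> by_cases hb : b = r1 <;> simp [ha, hb] <;> try tauto
  all_goals
    intro h1 h2
    rw [h1, h2]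

-- inserting root r1 ↦ root r2 on the A side matches relabelling l2 → l1 on the B side
theorem merge_invAB (roots d : PySem.Dict String String) (r1 r2 w1 w2 rA rB : String)
    (h : InvAB roots d)
    (hw1 : RootsTo roots w1 rA) (hw2 : RootsTo roots w2 rB) (hrne : rA ≠ rB)
    (hc1 : d.contains w1 = true) (hc2 : d.contains w2 = true)
    (hcase : (r1 = rA ∧ r2 = rB) ∨ (r1 = rB ∧ r2 = rA)) :
    InvAB (roots.insert r1 r2) (bMerge d (leaderOf d w1) (leaderOf d w2)) := by
  obtain ⟨hnd, hdnd, hwf, hvals, hkeys, hb2, hagree⟩ := h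
  set l1 := leaderOf d w1 with hl1def
  set l2 := leaderOf d w2 with hl2def
  have hlne : l1 ≠ l2 := by
    intro hcon
    obtain ⟨rt, hx, hy⟩ := (hagree w1 w2).2 hcon
    exact hrne ((rootsTo_unique _ _ _ _ hw1 hx).trans (rootsTo_unique _ _ _ _ hy hw2))
  have hl2c : d.contains l2 = true := hb2 w2 hc2
  have hl1c : d.contains l1 = true := hb2 w1 hc1
  obtain ⟨hbl, hbc⟩ := bMerge_spec d l1 l2 hdnd hl2c hlne
  have hr1 : IsRootD roots r1 := by
    rcases hcase with ⟨e1, _⟩ | ⟨e1, _⟩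
    · rw [e1]; exact hw1.1
    · rw [e1]; exact hw2.1
  have hr2 : IsRootD roots r2 := by
    rcases hcase with ⟨_, e2⟩ | ⟨_, e2⟩
    · rw [e2]; exact hw2.1
    · rw [e2]; exact hw1.1
  have hr12 : r1 ≠ r2 := by
    rcases hcase with ⟨e1, e2⟩ | ⟨e1, e2⟩
    · rw [e1, e2]; exact hrne
    · rw [e1, e2]; exact Ne.symm hrne
  have hpres := merge_insert roots r1 r2 hr1 hr2 hr12
  have hcr1 : roots.contains r1 = true := by
    rcases hcase with ⟨e1, _⟩ | ⟨e1, _⟩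
    · rw [e1]; exact rootsTo_contains roots hvals w1 rA (by rw [hkeys]; exact hc1) hw1
    · rw [e1]; exact rootsTo_contains roots hvals w2 rB (by rw [hkeys]; exact hc2) hw2
  have hcr2 : roots.contains r2 = true := by
    rcases hcase with ⟨_, e2⟩ | ⟨_, e2⟩
    · rw [e2]; exact rootsTo_contains roots hvals w2 rB (by rw [hkeys]; exact hc2) hw2
    · rw [e2]; exact rootsTo_contains roots hvals w1 rA (by rw [hkeys]; exact hc1) hw1
  have hcont : ∀ y, (roots.insert r1 r2).contains y = roots.contains y := by
    intro y
    rw [PySem.Dict.contains_insert]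
    by_cases hy : y = r1
    · subst hy; simp [hcr1]
    · simp [hy]
  -- x's root equals rA iff x's leader equals l1 (and likewise for rB / l2)
  have hrootA : ∀ x rx, RootsTo roots x rx → (rx = rA ↔ leaderOf d x = l1) := by
    intro x rx hx
    constructor
    · intro he
      exact (hagree x w1).1 ⟨rA, by rwa [he] at hx, hw1⟩
    · intro he
      obtain ⟨rt, h1', h2'⟩ := (hagree x w1).2 he
      rw [rootsTo_unique _ _ _ _ hx h1', rootsTo_unique _ _ _ _ h2' hw1]
  have hrootB : ∀ x rx, RootsTo roots x rx → (rx = rB ↔ leaderOf d x = l2) := by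
    intro x rx hx
    constructor
    · intro he
      exact (hagree x w2).1 ⟨rB, by rwa [he] at hx, hw2⟩
    · intro he
      obtain ⟨rt, h1', h2'⟩ := (hagree x w2).2 he
      rw [rootsTo_unique _ _ _ _ hx h1', rootsTo_unique _ _ _ _ h2' hw2]
  refine ⟨PySem.Dict.nodup_keys_insert _ _ _ hnd, ?_, ?_, ?_, ?_, ?_, ?_⟩
  · -- B keys stay Nodup: bMerge keeps the key list's membership; reprove via contains
    -- bMerge is a fold of inserts at existing keys, keys list itself unchanged as a set;
    -- Nodup follows from the generic foldl-insert lemma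
    have hnodup_any : ∀ (ks : List String) (d0 : PySem.Dict String String), d0.keys.Nodup →
        (ks.foldl (fun d' k => if d'.getD k k == l2 then d'.insert k l1 else d') d0).keys.Nodup := by
      intro ks
      induction ks with
      | nil => exact fun d0 h0 => h0
      | cons k ks ih =>
        intro d0 h0
        rw [List.foldl_cons]
        apply ih
        split
        · exact PySem.Dict.nodup_keys_insert _ _ _ h0
        · exact h0
    exact hnodup_any d.keys d hdnd
  · intro y
    obtain ⟨ry, hry⟩ := hwf y
    exact ⟨if ry = r1 then r2 else ry, hpres y ry hry⟩
  · intro y hy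
    rw [hcont] at hy
    rw [hcont, stepR_insert]
    by_cases hy1 : y = r1
    · simp only [hy1, if_pos]
      exact hcr2
    · rw [if_neg hy1]
      exact hvals y hy
  · intro y
    rw [hcont, hbc, hkeys]
  · intro y hy
    rw [hbc] at hy
    rw [hbc, hbl]
    by_cases hv : leaderOf d y = l2
    · simp [hv, hl1c]
    · simp [hv]
      exact hb2 y hy
  · intro x y
    obtain ⟨rx, hrx⟩ := hwf x
    obtain ⟨ry, hry⟩ := hwf y
    have hAx := hpres x rx hrx
    have hAy := hpres y ry hry
    have hA : SameRootD (roots.insert r1 r2) x y ↔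
        ((if rx = r1 then r2 else rx) = (if ry = r1 then r2 else ry)) := by
      constructor
      · rintro ⟨rt, h1', h2'⟩
        rw [← rootsTo_unique _ _ _ _ h1' hAx, ← rootsTo_unique _ _ _ _ h2' hAy]
      · intro he
        exact ⟨_, hAx, by rwa [he]⟩
    rw [hA, collapse_iff, hbl x, hbl y]
    have e1 : (rx = r1 ∨ rx = r2) ↔ (leaderOf d x = l1 ∨ leaderOf d x = l2) := by
      rcases hcase with ⟨ea, eb⟩ | ⟨ea, eb⟩ <;> (rw [ea, eb, hrootA x rx hrx, hrootB x rx hrx]; try tauto)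
    have e2 : (ry = r1 ∨ ry = r2) ↔ (leaderOf d y = l1 ∨ leaderOf d y = l2) := by
      rcases hcase with ⟨ea, eb⟩ | ⟨ea, eb⟩ <;> (rw [ea, eb, hrootA y ry hry, hrootB y ry hry]; try tauto)
    have e0 : rx = ry ↔ leaderOf d x = leaderOf d y := by
      rw [← hagree x y]
      constructor
      · intro he
        exact ⟨ry, by rwa [he] at hrx, hry⟩
      · rintro ⟨rt, h1', h2'⟩
        rw [← rootsTo_unique _ _ _ _ h1' hrx, ← rootsTo_unique _ _ _ _ h2' hry]
    rw [e0, e1, e2, collapse_iff l2 l1]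
    constructor
    · rintro (h | ⟨h1, h2⟩)
      · exact Or.inl h
      · exact Or.inr ⟨Or.symm h1, Or.symm h2⟩
    · rintro (h | ⟨h1, h2⟩)
      · exact Or.inl h
      · exact Or.inr ⟨Or.symm h1, Or.symm h2⟩

-- one "==" equation: A's union and B's relabelling step keep the invariant aligned
set_option maxHeartbeats 2000000 in
theorem union_invAB (st : UFSt) (d : PySem.Dict String String) (v1 v2 : String)
    (h : InvAB st.1 d) :
    InvAB (ufUnion st v1 v2).1
      (if (d.getD v1 v1) ≠ ((d.setdefault v1 v1).getD v2 v2)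
       then bMerge ((d.setdefault v1 v1).setdefault v2 v2) (d.getD v1 v1)
         ((d.setdefault v1 v1).getD v2 v2)
       else ((d.setdefault v1 v1).setdefault v2 v2)) := by
  have h1 : InvAB (ufAddNode st v1).1 (d.setdefault v1 v1) := addNode_invAB st d v1 h
  have h2 : InvAB (ufAddNode (ufAddNode st v1) v2).1
      ((d.setdefault v1 v1).setdefault v2 v2) := addNode_invAB _ _ v2 h1
  simp only [ufUnion]
  set st1 := ufAddNode (ufAddNode st v1) v2 with hst1
  set d1 := d.setdefault v1 v1 with hd1
  set d2 := d1.setdefault v2 v2 with hd2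
  set l1 := d.getD v1 v1 with hl1def
  set l2 := d1.getD v2 v2 with hl2def
  obtain ⟨hxA, hI1, hcont1, hpres1⟩ := ufFind_spec st1.1 d2 v1 h2
  set roots1 := (ufFind st1.1 v1).1 with hroots1
  set xr := (ufFind st1.1 v1).2 with hxr
  obtain ⟨hyA, hI2, hcont2, hpres2⟩ := ufFind_spec roots1 d2 v2 hI1
  set roots2 := (ufFind roots1 v2).1 with hroots2
  set yr := (ufFind roots1 v2).2 with hyr
  have hx2 : RootsTo roots2 v1 xr := hpres2 _ _ (hpres1 _ _ hxA)
  have hy2 : RootsTo roots2 v2 yr := hpres2 _ _ hyA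
  have hl1' : leaderOf d2 v1 = l1 := by
    rw [hd2, leaderOf_setdefault_self d1 v2 v1, hd1, leaderOf_setdefault_self d v1 v1]
    rfl
  have hl2' : leaderOf d2 v2 = l2 := by
    rw [hd2, leaderOf_setdefault_self d1 v2 v2]
    rfl
  have hc1 : d2.contains v1 = true := by
    rw [hd2, contains_setdefault_self d1 v2 v1, hd1, contains_setdefault_self d v1 v1]
    simp
  have hc2 : d2.contains v2 = true := by
    rw [hd2, contains_setdefault_self d1 v2 v2]
    simp
  have hiff : xr = yr ↔ l1 = l2 := by
    rw [← hl1', ← hl2', ← (hI2.2.2.2.2.2.2 v1 v2)]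
    constructor
    · intro he
      exact ⟨yr, by rwa [he] at hx2, hy2⟩
    · rintro ⟨rt, ha, hb⟩
      rw [← rootsTo_unique _ _ _ _ ha hx2, ← rootsTo_unique _ _ _ _ hb hy2]
  by_cases hxy : xr = yr
  · rw [if_pos hxy, if_neg (not_not_intro (hiff.1 hxy))]
    exact hI2
  · rw [if_neg hxy, if_pos (fun hcon => hxy (hiff.2 hcon))]
    by_cases hrank : st1.2.1.getD xr 0 > st1.2.1.getD yr 0
    · rw [if_pos hrank]
      have hgoal := merge_invAB roots2 d2 yr xr v1 v2 xr yr hI2 hx2 hy2 hxy hc1 hc2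
        (Or.inr ⟨rfl, rfl⟩)
      rw [hl1', hl2'] at hgoal
      exact hgoal
    · rw [if_neg hrank]
      have hgoal := merge_invAB roots2 d2 xr yr v1 v2 xr yr hI2 hx2 hy2 hxy hc1 hc2
        (Or.inl ⟨rfl, rfl⟩)
      rw [hl1', hl2'] at hgoal
      exact hgoal

theorem invAB_step (st : UFSt) (d : PySem.Dict String String) (eq : String)
    (h : InvAB st.1 d) : InvAB (eqStep st eq).1 (bStep d eq) := by
  rw [eqStep, bStep]
  by_cases hin : PySem.Str.isIn "==" eq
  · rw [if_pos hin, if_pos hin]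
    cases hsp : PySem.Str.split? eq "==" with
    | none => exact h
    | some l =>
      rcases l with _ | ⟨v1, _ | ⟨v2, _ | ⟨v3, rest⟩⟩⟩
      · exact h
      · exact h
      · exact union_invAB st d v1 v2 h
      · exact h
  · rw [if_neg hin, if_neg hin]
    exact h

theorem invAB_fold (eqs : List String) :
    ∀ (st : UFSt) (d : PySem.Dict String String), InvAB st.1 d →
    InvAB (eqs.foldl eqStep st).1 (eqs.foldl bStep d) := by
  induction eqs with
  | nil => exact fun st d h => h
  | cons eq rest ih =>
    intro st d h
    rw [List.foldl_cons, List.foldl_cons]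
    exact ih _ _ (invAB_step st d eq h)

-- the "!=" test: A's connected (with compression) equals B's pure leader comparison
theorem connected_spec (roots d : PySem.Dict String String) (v1 v2 : String)
    (h : InvAB roots d) (hne : v1 ≠ v2) :
    (ufConnected roots v1 v2).2 = (d.getD v1 v1 == d.getD v2 v2) ∧
    InvAB (ufConnected roots v1 v2).1 d := by
  obtain ⟨hnd, hdnd, hwf, hvals, hkeys, hb2, hagree⟩ := h
  rw [ufConnected]
  by_cases hcc : (roots.contains v1 && roots.contains v2) = true
  · rw [if_pos hcc]
    obtain ⟨hc1, hc2⟩ := Bool.and_eq_true_iff.1 hcc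
    have hI : InvAB roots d := ⟨hnd, hdnd, hwf, hvals, hkeys, hb2, hagree⟩
    obtain ⟨hxA, hI1, hcont1, hpres1⟩ := ufFind_spec roots d v1 hI
    obtain ⟨hyA, hI2, hcont2, hpres2⟩ := ufFind_spec (ufFind roots v1).1 d v2 hI1
    refine ⟨?_, hI2⟩
    have hx1 : RootsTo (ufFind roots v1).1 v1 (ufFind roots v1).2 := hpres1 _ _ hxA
    have hiff : (ufFind roots v1).2 = (ufFind (ufFind roots v1).1 v2).2 ↔
        leaderOf d v1 = leaderOf d v2 := by
      rw [← (hI1.2.2.2.2.2.2 v1 v2)]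
      constructor
      · intro he
        exact ⟨_, by rwa [he] at hx1, hyA⟩
      · rintro ⟨rt, ha, hb⟩
        rw [← rootsTo_unique _ _ _ _ ha hx1, ← rootsTo_unique _ _ _ _ hb hyA]
    show ((ufFind roots v1).2 == (ufFind (ufFind roots v1).1 v2).2) = _
    by_cases he : (ufFind roots v1).2 = (ufFind (ufFind roots v1).1 v2).2
    · rw [he]
      have := hiff.1 he
      simp only [leaderOf] at this
      simp [this]
    · have hld : ¬ leaderOf d v1 = leaderOf d v2 := fun hcon => he (hiff.2 hcon)
      simp only [leaderOf] at hld
      simp [he, hld]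
  · rw [if_neg hcc]
    refine ⟨?_, hnd, hdnd, hwf, hvals, hkeys, hb2, hagree⟩
    have hor : roots.contains v1 = false ∨ roots.contains v2 = false := by
      by_cases h1 : roots.contains v1 = true
      · by_cases h2 : roots.contains v2 = true
        · exact absurd (by rw [h1, h2]; rfl) hcc
        · exact Or.inr (by simpa using h2)
      · exact Or.inl (by simpa using h1)
    have hld : leaderOf d v1 ≠ leaderOf d v2 := by
      rcases hor with hcf | hcf
      · have hd1 : d.contains v1 = false := by rw [← hkeys]; exact hcf
        have hlv1 : leaderOf d v1 = v1 := PySem.Dict.getD_of_not_contains d v1 hd1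
        by_cases hc2' : d.contains v2 = true
        · have : d.contains (leaderOf d v2) = true := hb2 v2 hc2'
          intro hcon
          rw [hlv1] at hcon
          rw [← hcon] at this
          rw [hd1] at this
          exact Bool.noConfusion this
        · have hlv2 : leaderOf d v2 = v2 :=
            PySem.Dict.getD_of_not_contains d v2 (by simpa using hc2')
          rw [hlv1, hlv2]
          exact hne
      · have hd2 : d.contains v2 = false := by rw [← hkeys]; exact hcf
        have hlv2 : leaderOf d v2 = v2 := PySem.Dict.getD_of_not_contains d v2 hd2
        by_cases hc1' : d.contains v1 = true
        · have : d.contains (leaderOf d v1) = true := hb2 v1 hc1'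
          intro hcon
          rw [hlv2] at hcon
          rw [hcon] at this
          rw [hd2] at this
          exact Bool.noConfusion this
        · have hlv1 : leaderOf d v1 = v1 :=
            PySem.Dict.getD_of_not_contains d v1 (by simpa using hc1')
          rw [hlv1, hlv2]
          exact hne
    have hld' : ¬ d.getD v1 v1 = d.getD v2 v2 := hld
    simp [hld']

theorem neqLoop_eq (eqs : List String) :
    ∀ (roots d : PySem.Dict String String), InvAB roots d →
    (∀ eq ∈ eqs, PySem.Str.isIn "!=" eq = true →
      ((PySem.Str.split? eq "!=").getD []).length = 2) →
    neqLoop roots eqs = eqs.all (fun eq =>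
      if PySem.Str.isIn "!=" eq then
        match PySem.Str.split? eq "!=" with
        | some [v1, v2] => !(v1 == v2 || d.getD v1 v1 == d.getD v2 v2)
        | _ => true
      else true) := by
  induction eqs with
  | nil => intro roots d _ _; rfl
  | cons eq rest ih =>
    intro roots d h hpre
    rw [neqLoop, List.all_cons]
    by_cases hin : PySem.Str.isIn "!=" eq
    · rw [if_pos hin]
      simp only [if_pos hin]
      have hlen := hpre eq List.mem_cons_self hin
      cases hsp : PySem.Str.split? eq "!=" with
      | none => rw [hsp] at hlen; simp at hlen
      | some l =>
        rw [hsp] at hlen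
        simp only [Option.getD_some] at hlen
        match l, hlen with
        | [v1, v2], _ =>
          by_cases hvv : v1 = v2
          · subst hvv
            simp
          · obtain ⟨hcb, hI'⟩ := connected_spec roots d v1 v2 h hvv
            have hvvb : (v1 == v2) = false := by simpa using hvv
            by_cases hld : (d.getD v1 v1 == d.getD v2 v2) = true
            · simp [hvv, hvvb, hcb, hld]
            · have hld' : (d.getD v1 v1 == d.getD v2 v2) = false := by simpa using hld
              have hcond : ¬ ((ufConnected roots v1 v2).2 = true) := by
                rw [hcb, hld']
                exact Bool.false_ne_true
              simp only [if_neg hvv, if_neg hcond, hvvb, hld', Bool.or_self,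
                Bool.not_false, Bool.true_and]
              exact ih (ufConnected roots v1 v2).1 d hI'
                (fun e he hi => hpre e (List.mem_cons_of_mem _ he) hi)
    · rw [if_neg hin]
      simp only [if_neg hin]
      rw [ih roots d h (fun e he hi => hpre e (List.mem_cons_of_mem _ he) hi)]
      simp

theorem invAB_empty :
    InvAB (PySem.Dict.empty : PySem.Dict String String)
      (PySem.Dict.empty : PySem.Dict String String) := by
  have hstep : ∀ x, stepR (PySem.Dict.empty : PySem.Dict String String) x = x := by
    intro x
    exact PySem.Dict.getD_of_not_contains _ x (PySem.Dict.contains_empty x)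
  have hiter : ∀ (n : Nat) (x : String),
      (stepR (PySem.Dict.empty : PySem.Dict String String))^[n] x = x := by
    intro n
    induction n with
    | zero => exact fun x => rfl
    | succ k ihk =>
      intro x
      rw [Function.iterate_succ_apply, hstep]
      exact ihk x
  have hroot : ∀ x r, RootsTo (PySem.Dict.empty : PySem.Dict String String) x r → x = r := by
    rintro x r ⟨hr, n, hn⟩
    rw [← hn, hiter n x]
  refine ⟨PySem.Dict.nodup_keys_empty, PySem.Dict.nodup_keys_empty, ?_, ?_, ?_, ?_, ?_⟩
  · intro x
    exact ⟨x, hstep x, 0, rfl⟩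
  · intro x hx
    rw [PySem.Dict.contains_empty] at hx
    exact Bool.noConfusion hx
  · intro x; rfl
  · intro x hx
    rw [PySem.Dict.contains_empty] at hx
    exact Bool.noConfusion hx
  · intro x y
    constructor
    · rintro ⟨r, hx, hy⟩
      rw [leaderOf, leaderOf,
        PySem.Dict.getD_of_not_contains _ x (PySem.Dict.contains_empty x),
        PySem.Dict.getD_of_not_contains _ y (PySem.Dict.contains_empty y)]
      rw [hroot x r hx, hroot y r hy]
    · intro he
      rw [leaderOf, leaderOf,
        PySem.Dict.getD_of_not_contains _ x (PySem.Dict.contains_empty x),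
        PySem.Dict.getD_of_not_contains _ y (PySem.Dict.contains_empty y)] at he
      subst he
      exact ⟨x, ⟨hstep x, 0, rfl⟩, ⟨hstep x, 0, rfl⟩⟩

-- ===== VERDICT (by name: the statement is the Claim_ definition above) =====
theorem equationsPossible_spec : Claim_equal_equationsPossible := by
  intro equations _ hpre
  unfold Spec_equationsPossible equationsPossible equationsPossible_alt
  have hinv := invAB_fold equations
    (PySem.Dict.empty, PySem.Dict.empty, PySem.Dict.empty) PySem.Dict.empty invAB_empty
  exact neqLoop_eq equations _ _ hinv
    (fun eq he hi => (hpre eq he).2 hi)
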